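-- pv_equiv track=rewrite | github.com/molxeuz/recuperacion_practicas_edd2026_1 | main_re.py | suma_impares_diagonal
-- ===== SOURCE A (Python) =====
-- def suma_impares_diagonal(matriz, i=0):
--     n = len(matriz)
--     if i >= n:
--         return 0
--     suma = 0
--     if matriz[i][i] % 2 != 0:
--         suma += matriz[i][i]
--     if i != n - 1 - i:
--         if matriz[i][n - 1 - i] % 2 != 0:
--             suma += matriz[i][n - 1 - i]
--     return suma + suma_impares_diagonal(matriz, i + 1)
-- ===== SOURCE B (Python) =====
-- def suma_impares_diagonal(matriz, i=0):
--     # Iterative single-pass rewrite: one for-loop accumulates the odd diagonal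
--     # and anti-diagonal elements instead of summing through recursive calls.
--     n = len(matriz)
--     suma = 0
--     for j in range(i, n):
--         v = matriz[j][j]
--         if v % 2 != 0:
--             suma += v
--         if j != n - 1 - j:
--             w = matriz[j][n - 1 - j]
--             if w % 2 != 0:
--                 suma += w
--     return suma
-- ===== Notes on version B (the rewrite author's own statement) =====
-- stated objective: simpler
-- what changed: Replaces the recursion over the starting row with a single iterative for-loop that accumulates the sum in one accumulator.
import Mathlib
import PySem

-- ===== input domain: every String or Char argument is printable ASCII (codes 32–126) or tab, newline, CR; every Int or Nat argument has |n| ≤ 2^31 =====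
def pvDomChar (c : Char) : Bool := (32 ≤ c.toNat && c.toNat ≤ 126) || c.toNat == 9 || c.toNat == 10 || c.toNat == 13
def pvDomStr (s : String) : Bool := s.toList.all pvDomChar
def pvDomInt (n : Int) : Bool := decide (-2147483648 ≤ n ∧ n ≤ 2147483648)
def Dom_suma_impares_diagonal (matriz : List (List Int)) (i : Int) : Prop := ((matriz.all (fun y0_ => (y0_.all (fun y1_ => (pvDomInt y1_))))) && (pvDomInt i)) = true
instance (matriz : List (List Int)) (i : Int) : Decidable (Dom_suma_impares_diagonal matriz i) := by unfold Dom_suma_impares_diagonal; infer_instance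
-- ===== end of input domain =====

-- B replaces A's recursion over the starting row by a single iterative loop with one accumulator (objective: simpler); same values on Pre_.
-- ===== PORT A =====
-- Literal port of A: recursion on the row index i (pyGetD is exact under Pre_).
def suma_impares_diagonal (matriz : List (List Int)) (i : Int) : Int :=
  let n : Int := matriz.length
  if _h : n ≤ i then 0
  else
    let row := PySem.List.pyGetD matriz i []
    let suma : Int := 0
    let suma := if PySem.Int.mod (PySem.List.pyGetD row i 0) 2 ≠ 0 then suma + PySem.List.pyGetD row i 0 else suma
    let suma := if i ≠ n - 1 - i then
        (if PySem.Int.mod (PySem.List.pyGetD row (n - 1 - i) 0) 2 ≠ 0 then suma + PySem.List.pyGetD row (n - 1 - i) 0 else suma)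
      else suma
    suma + suma_impares_diagonal matriz (i + 1)
termination_by ((matriz.length : Int) - i).toNat
decreasing_by simp at _h; omega

-- ===== PORT B =====
-- Port of B: one fold over range(i, n) with a single accumulator.
def suma_impares_diagonal_alt (matriz : List (List Int)) (i : Int) : Int :=
  let n : Int := matriz.length
  (PySem.List.pyRange i n 1).foldl (fun suma j =>
    let row := PySem.List.pyGetD matriz j []
    let v := PySem.List.pyGetD row j 0
    let suma := if PySem.Int.mod v 2 ≠ 0 then suma + v else suma
    if j ≠ n - 1 - j then
      (let w := PySem.List.pyGetD row (n - 1 - j) 0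
       if PySem.Int.mod w 2 ≠ 0 then suma + w else suma)
    else suma) 0

-- ===== PRECONDITION & SPEC =====
-- Pre_: exactly the inputs where Python A raises no IndexError — every visited
-- row index j in range(i, n) and both column indices j and n-1-j (the latter
-- only when it is actually accessed) are in Python's index range.
def Pre_suma_impares_diagonal (matriz : List (List Int)) (i : Int) : Prop :=
  ((matriz.length : Int) ≤ i) ∨
  (-(matriz.length : Int) ≤ i ∧
  ∀ j ∈ PySem.List.pyRange i (matriz.length : Int) 1,
    PySem.Raise.InRange matriz.length j ∧
    PySem.Raise.InRange (PySem.List.pyGetD matriz j []).length j ∧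
    (j ≠ (matriz.length : Int) - 1 - j →
      PySem.Raise.InRange (PySem.List.pyGetD matriz j []).length ((matriz.length : Int) - 1 - j)))
instance (matriz : List (List Int)) (i : Int) : Decidable (Pre_suma_impares_diagonal matriz i) := by
  unfold Pre_suma_impares_diagonal; infer_instance
def pvWitness_suma_impares_diagonal : List (List Int) × Int := ([[1, 2], [3, 4]], 0)

def Spec_suma_impares_diagonal (matriz : List (List Int)) (i : Int) (out : Int) : Prop := out = suma_impares_diagonal_alt matriz i
instance (matriz : List (List Int)) (i : Int) (out : Int) : Decidable (Spec_suma_impares_diagonal matriz i out) := by unfold Spec_suma_impares_diagonal; infer_instance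

-- ===== CLAIM (what is proved, stated in full; the proofs are below) =====
def Claim_equal_suma_impares_diagonal : Prop := ∀ (matriz : List (List Int)) (i : Int), Dom_suma_impares_diagonal matriz i → Pre_suma_impares_diagonal matriz i → Spec_suma_impares_diagonal matriz i (suma_impares_diagonal matriz i)

-- ===== LEMMAS AND PROOFS =====

-- a fold whose body only adds to the accumulator distributes over it
theorem foldl_shift (f : Int → Int → Int) (hf : ∀ s j, f s j = s + f 0 j) (l : List Int) (s : Int) :
    l.foldl f s = s + l.foldl f 0 := by
  induction l generalizing s with
  | nil => simp
  | cons a t ih =>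
    simp only [List.foldl_cons]
    rw [ih, ih (f 0 a), hf s a]
    ring

-- the ports agree on every input (both are total via pyGetD defaults)
theorem ports_eq (matriz : List (List Int)) (i : Int) :
    suma_impares_diagonal matriz i = suma_impares_diagonal_alt matriz i := by
  by_cases h : (matriz.length : Int) ≤ i
  · rw [suma_impares_diagonal, dif_pos h]
    simp [suma_impares_diagonal_alt, PySem.List.pyRange_one_eq_nil h]
  · rw [suma_impares_diagonal, dif_neg h]
    rw [ports_eq matriz (i + 1)]
    simp only [suma_impares_diagonal_alt]
    rw [PySem.List.pyRange_one_cons (by omega : i < (matriz.length : Int)), List.foldl_cons]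
    conv_rhs => rw [foldl_shift _ (by intro s j; split_ifs <;> ring)]
termination_by ((matriz.length : Int) - i).toNat
decreasing_by omega

-- ===== VERDICT (by name: the statement is the Claim_ definition above) =====
theorem suma_impares_diagonal_spec : Claim_equal_suma_impares_diagonal := by
  intro matriz i _ _
  unfold Spec_suma_impares_diagonal
  exact ports_eq matriz i
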